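-- pv_equiv track=rewrite | github.com/Sooyoung-Lim/Algorithm | SWEA/flatten/sol5.py | solution
-- ===== SOURCE A (Python) =====
-- def solution(dump_limit, boxes):
--
--     for _ in range(dump_limit):
--         max_idx = min_idx = 0
--         # 가장 큰 / 작은 박스 찾기
--         for idx in range(len(boxes)):
--             if boxes[idx] > boxes[max_idx]:
--                 max_idx = idx
--             elif boxes[idx] < boxes[min_idx]:
--                 min_idx = idx
--
--         boxes[max_idx] -= 1
--         boxes[min_idx] += 1
--
--         # dump 한 회차가 끝나고 확인
--         max_idx = min_idx = 0
--         # 가장 큰 / 작은 박스 찾기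
--         for idx in range(len(boxes)):
--             if boxes[idx] > boxes[max_idx]:
--                 max_idx = idx
--             elif boxes[idx] < boxes[min_idx]:
--                 min_idx = idx
--
--         diff = boxes[max_idx] - boxes[min_idx]
--         if diff == 0:
--             return 0
--         elif diff == 1:
--             return 1
--
--     # for 문 끝났으면 (dump_limit 만큼 종료)
--     max_idx = min_idx = 0
--     for idx in range(len(boxes)):
--         if boxes[idx] > boxes[max_idx]:
--             max_idx = idx
--         elif boxes[idx] < boxes[min_idx]:
--             min_idx = idx
--     return boxes[max_idx] - boxes[min_idx]
-- ===== SOURCE B (Python) =====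
-- def solution(dump_limit, boxes):
--     # Closed-form: after t dumps the max level is the least L with
--     # sum(max(x-L,0)) <= t and the min level the greatest L with
--     # sum(max(L-x,0)) <= t; once the difference reaches <= 1 it freezes
--     # at 0 if sum % n == 0 else 1.  Two binary searches, no simulation.
--     t = dump_limit if dump_limit > 0 else 0
--     hi0 = max(boxes)
--     lo0 = min(boxes)
--     s = sum(boxes)
--     n = len(boxes)
--
--     def cost_top(L):
--         return sum(x - L for x in boxes if x > L)
--
--     def cost_bot(L):
--         return sum(L - x for x in boxes if x < L)
--
--     lo, hi = hi0 - t, hi0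
--     while lo < hi:
--         mid = (lo + hi) // 2
--         if cost_top(mid) <= t:
--             hi = mid
--         else:
--             lo = mid + 1
--     f = lo
--
--     lo, hi = lo0, lo0 + t
--     while lo < hi:
--         mid = (lo + hi + 1) // 2
--         if cost_bot(mid) <= t:
--             lo = mid
--         else:
--             hi = mid - 1
--     g = lo
--
--     base = 0 if s % n == 0 else 1
--     d = f - g
--     return d if d > base else base
-- ===== Notes on version B (the rewrite author's own statement) =====
-- stated objective: faster
-- what changed: A simulates every dump (rescanning the whole list for max/min each round, O(dump_limit*n)); B computes the final max/min levels in closed form with two binary searches over levels (cost functions sum(max(x-L,0))), freezing the gap at 0 or 1 according to sum%n once it closes, with no simulation at all.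
import Mathlib
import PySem

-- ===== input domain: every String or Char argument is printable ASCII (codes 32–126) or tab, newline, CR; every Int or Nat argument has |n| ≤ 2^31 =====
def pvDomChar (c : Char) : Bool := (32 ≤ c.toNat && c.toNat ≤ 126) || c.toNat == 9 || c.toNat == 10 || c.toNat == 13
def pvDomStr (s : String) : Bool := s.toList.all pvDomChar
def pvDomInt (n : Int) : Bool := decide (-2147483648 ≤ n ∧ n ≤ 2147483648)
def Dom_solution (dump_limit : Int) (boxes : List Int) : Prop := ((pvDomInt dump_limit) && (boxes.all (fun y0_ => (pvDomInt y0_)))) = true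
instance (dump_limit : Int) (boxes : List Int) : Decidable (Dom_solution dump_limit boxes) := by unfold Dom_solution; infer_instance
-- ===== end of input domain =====

-- B replaces A's O(dump_limit·n) dump-by-dump simulation by a closed form (two binary
-- searches for the max/min level after the dumps, frozen at sum%n when the gap reaches ≤1);
-- the equivalence is about the RETURN value only (Python A mutates its `boxes` argument in place, B does not).

-- ===== PORT A =====
-- A's thrice-repeated verbatim max/min index scan ('for idx in range(len(boxes)): …')
def scanA (boxes : List Int) : Int × Int :=
  (PySem.List.pyRange 0 (boxes.length : Int) 1).foldl
    (fun (p : Int × Int) idx =>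
      if PySem.List.pyGetD boxes idx 0 > PySem.List.pyGetD boxes p.1 0 then (idx, p.2)
      else if PySem.List.pyGetD boxes idx 0 < PySem.List.pyGetD boxes p.2 0 then (p.1, idx)
      else p)
    (0, 0)

-- body of 'for _ in range(dump_limit)' with its early returns, as structural recursion on the trip count
def loopA (fuel : Nat) (boxes : List Int) : Int :=
  match fuel with
  | 0 =>
    -- the code after the for-loop
    let p := scanA boxes
    PySem.List.pyGetD boxes p.1 0 - PySem.List.pyGetD boxes p.2 0
  | Nat.succ fuel' =>
    let p := scanA boxes
    let b1 := PySem.List.pySetD boxes p.1 (PySem.List.pyGetD boxes p.1 0 - 1)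
    let b2 := PySem.List.pySetD b1 p.2 (PySem.List.pyGetD b1 p.2 0 + 1)
    let q := scanA b2
    let diff := PySem.List.pyGetD b2 q.1 0 - PySem.List.pyGetD b2 q.2 0
    if diff = 0 then 0
    else if diff = 1 then 1
    else loopA fuel' b2

def solution (dump_limit : Int) (boxes : List Int) : Int :=
  -- range(dump_limit) has max(dump_limit,0) = dump_limit.toNat iterations
  loopA dump_limit.toNat boxes

-- ===== PORT B =====
-- cost_top(L) = sum(x - L for x in boxes if x > L)
def costTop (boxes : List Int) (L : Int) : Int :=
  ((boxes.filter (fun x => decide (L < x))).map (fun x => x - L)).sum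

-- cost_bot(L) = sum(L - x for x in boxes if x < L)
def costBot (boxes : List Int) (L : Int) : Int :=
  ((boxes.filter (fun x => decide (x < L))).map (fun x => L - x)).sum

-- 'while lo < hi: mid=(lo+hi)//2; …' — the loop runs < (hi-lo).toNat+1 times (the gap shrinks
-- each trip), so it is transcribed with that trip count as structural fuel
def bsTopAux (boxes : List Int) (t : Int) (fuel : Nat) (lo hi : Int) : Int :=
  match fuel with
  | 0 => lo
  | Nat.succ fuel' =>
    if lo < hi then
      let mid := PySem.Int.floordiv (lo + hi) 2
      if costTop boxes mid ≤ t then bsTopAux boxes t fuel' lo mid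
      else bsTopAux boxes t fuel' (mid + 1) hi
    else lo

def bsTop (boxes : List Int) (t lo hi : Int) : Int :=
  bsTopAux boxes t (hi - lo).toNat lo hi

-- 'while lo < hi: mid=(lo+hi+1)//2; …'
def bsBotAux (boxes : List Int) (t : Int) (fuel : Nat) (lo hi : Int) : Int :=
  match fuel with
  | 0 => lo
  | Nat.succ fuel' =>
    if lo < hi then
      let mid := PySem.Int.floordiv (lo + hi + 1) 2
      if costBot boxes mid ≤ t then bsBotAux boxes t fuel' mid hi
      else bsBotAux boxes t fuel' lo (mid - 1)
    else lo

def bsBot (boxes : List Int) (t lo hi : Int) : Int :=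
  bsBotAux boxes t (hi - lo).toNat lo hi

def solution_alt (dump_limit : Int) (boxes : List Int) : Int :=
  let t := if dump_limit > 0 then dump_limit else 0
  let hi0 := (PySem.List.max? boxes (fun y => y)).getD 0   -- max(boxes); empty list (ValueError) excluded by Pre_
  let lo0 := (PySem.List.min? boxes (fun y => y)).getD 0   -- min(boxes)
  let s := boxes.sum
  let n : Int := (boxes.length : Int)
  let f := bsTop boxes t (hi0 - t) hi0
  let g := bsBot boxes t lo0 (lo0 + t)
  let base : Int := if PySem.Int.mod s n = 0 then 0 else 1
  let d := f - g
  if d > base then d else base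

-- ===== PRECONDITION & SPEC =====
-- Pre_ excludes only the empty list, on which Python A raises IndexError (and B's max() raises ValueError).
def Pre_solution (dump_limit : Int) (boxes : List Int) : Prop := boxes ≠ []
instance (dump_limit : Int) (boxes : List Int) : Decidable (Pre_solution dump_limit boxes) := by unfold Pre_solution; infer_instance
def pvWitness_solution : Int × List Int := (3, [1, 5, 2])

def Spec_solution (dump_limit : Int) (boxes : List Int) (out : Int) : Prop := out = solution_alt dump_limit boxes
instance (dump_limit : Int) (boxes : List Int) (out : Int) : Decidable (Spec_solution dump_limit boxes out) := by unfold Spec_solution; infer_instance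

-- ===== CLAIM (what is proved, stated in full; the proofs are below) =====
def Claim_equal_solution : Prop := ∀ (dump_limit : Int) (boxes : List Int), Dom_solution dump_limit boxes → Pre_solution dump_limit boxes → Spec_solution dump_limit boxes (solution dump_limit boxes)

-- ===== LEMMAS AND PROOFS =====

-- proof-side abbreviations
def vmax (xs : List Int) : Int := (PySem.List.max? xs (fun y => y)).getD 0
def vmin (xs : List Int) : Int := (PySem.List.min? xs (fun y => y)).getD 0
def Ftop (xs : List Int) (t : Int) : Int := bsTop xs t (vmax xs - t) (vmax xs)
def Gbot (xs : List Int) (t : Int) : Int := bsBot xs t (vmin xs) (vmin xs + t)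
def dLvl (xs : List Int) (t : Int) : Int := Ftop xs t - Gbot xs t
def cntGE (xs : List Int) (L : Int) : Int := ((xs.filter (fun x => decide (L ≤ x))).length : Int)
def cntLE (xs : List Int) (L : Int) : Int := ((xs.filter (fun x => decide (x ≤ L))).length : Int)

theorem vmax_mem (xs : List Int) (h : xs ≠ []) : vmax xs ∈ xs := by
  unfold vmax
  cases hm : PySem.List.max? xs (fun y => y) with
  | none => exact absurd ((PySem.List.max?_eq_none_iff _ _).mp hm) h
  | some m => simpa using PySem.List.max?_mem hm

theorem vmax_isMax (xs : List Int) (h : xs ≠ []) : ∀ x ∈ xs, x ≤ vmax xs := by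
  unfold vmax
  cases hm : PySem.List.max? xs (fun y => y) with
  | none => exact absurd ((PySem.List.max?_eq_none_iff _ _).mp hm) h
  | some m => simpa using PySem.List.max?_isMax hm

theorem vmin_mem (xs : List Int) (h : xs ≠ []) : vmin xs ∈ xs := by
  unfold vmin
  cases hm : PySem.List.min? xs (fun y => y) with
  | none => exact absurd ((PySem.List.min?_eq_none_iff _ _).mp hm) h
  | some m => simpa using PySem.List.min?_mem hm

theorem vmin_isMin (xs : List Int) (h : xs ≠ []) : ∀ x ∈ xs, vmin xs ≤ x := by
  unfold vmin
  cases hm : PySem.List.min? xs (fun y => y) with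
  | none => exact absurd ((PySem.List.min?_eq_none_iff _ _).mp hm) h
  | some m => simpa using PySem.List.min?_isMin hm

theorem vmin_le_vmax (xs : List Int) (h : xs ≠ []) : vmin xs ≤ vmax xs :=
  le_trans (vmin_isMin xs h _ (vmax_mem xs h)) (le_refl _)

theorem eq_vmax (xs : List Int) (h : xs ≠ []) (b : Int) (hb : b ∈ xs)
    (hmax : ∀ x ∈ xs, x ≤ b) : b = vmax xs :=
  le_antisymm (vmax_isMax xs h b hb) (hmax _ (vmax_mem xs h))

theorem eq_vmin (xs : List Int) (h : xs ≠ []) (b : Int) (hb : b ∈ xs)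
    (hmin : ∀ x ∈ xs, b ≤ x) : b = vmin xs :=
  le_antisymm (hmin _ (vmin_mem xs h)) (vmin_isMin xs h b hb)

theorem all_eq_of_vmax_eq_vmin (xs : List Int) (h : xs ≠ []) (he : vmax xs = vmin xs) :
    ∀ x ∈ xs, x = vmax xs := by
  intro x hx
  have h1 := vmax_isMax xs h x hx
  have h2 := vmin_isMin xs h x hx
  omega

theorem costTop_eq_sum (xs : List Int) (L : Int) :
    costTop xs L = (xs.map (fun x => max (x - L) 0)).sum := by
  induction xs with
  | nil => rfl
  | cons a xs ih =>
    simp only [costTop, List.filter_cons] at *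
    by_cases h : L < a
    · simp [h, ih]; omega
    · simp [h, ih]; omega

theorem costBot_eq_sum (xs : List Int) (L : Int) :
    costBot xs L = (xs.map (fun x => max (L - x) 0)).sum := by
  induction xs with
  | nil => rfl
  | cons a xs ih =>
    simp only [costBot, List.filter_cons] at *
    by_cases h : a < L
    · simp [h, ih]; omega
    · simp [h, ih]; omega

theorem costTop_nonneg (xs : List Int) (L : Int) : 0 ≤ costTop xs L := by
  rw [costTop_eq_sum]
  induction xs with
  | nil => simp
  | cons a xs ih => simp only [List.map_cons, List.sum_cons]; omega

theorem costBot_nonneg (xs : List Int) (L : Int) : 0 ≤ costBot xs L := by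
  rw [costBot_eq_sum]
  induction xs with
  | nil => simp
  | cons a xs ih => simp only [List.map_cons, List.sum_cons]; omega

theorem costTop_antitone (xs : List Int) (L L' : Int) (h : L ≤ L') :
    costTop xs L' ≤ costTop xs L := by
  rw [costTop_eq_sum, costTop_eq_sum]
  induction xs with
  | nil => simp
  | cons a xs ih => simp only [List.map_cons, List.sum_cons]; omega

theorem costBot_monotone (xs : List Int) (L L' : Int) (h : L ≤ L') :
    costBot xs L ≤ costBot xs L' := by
  rw [costBot_eq_sum, costBot_eq_sum]
  induction xs with
  | nil => simp
  | cons a xs ih => simp only [List.map_cons, List.sum_cons]; omega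



theorem costTop_succ (xs : List Int) (L : Int) :
    costTop xs L = costTop xs (L + 1) + cntGE xs (L + 1) := by
  rw [costTop_eq_sum, costTop_eq_sum]
  unfold cntGE
  induction xs with
  | nil => simp
  | cons a xs ih =>
    simp only [List.map_cons, List.sum_cons, List.filter_cons]
    by_cases h : (L + 1 : Int) ≤ a
    · simp only [h, decide_true, if_true, List.length_cons]
      push_cast at *
      omega
    · simp only [h, decide_false]
      push_cast at *
      omega

theorem costBot_succ (xs : List Int) (L : Int) :
    costBot xs L = costBot xs (L - 1) + cntLE xs (L - 1) := by
  rw [costBot_eq_sum, costBot_eq_sum]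
  unfold cntLE
  induction xs with
  | nil => simp
  | cons a xs ih =>
    simp only [List.map_cons, List.sum_cons, List.filter_cons]
    by_cases h : a ≤ (L - 1 : Int)
    · simp only [h, decide_true, if_true, List.length_cons]
      push_cast at *
      omega
    · simp only [h, decide_false]
      push_cast at *
      omega

theorem cntGE_pos (xs : List Int) (h : xs ≠ []) (L : Int) (hL : L ≤ vmax xs) :
    1 ≤ cntGE xs L := by
  unfold cntGE
  have : vmax xs ∈ xs.filter (fun x => decide (L ≤ x)) := by
    simp [List.mem_filter, vmax_mem xs h, hL]
  have := List.length_pos_of_mem this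
  omega

theorem cntLE_pos (xs : List Int) (h : xs ≠ []) (L : Int) (hL : vmin xs ≤ L) :
    1 ≤ cntLE xs L := by
  unfold cntLE
  have : vmin xs ∈ xs.filter (fun x => decide (x ≤ L)) := by
    simp [List.mem_filter, vmin_mem xs h, hL]
  have := List.length_pos_of_mem this
  omega


theorem costTop_vmax (xs : List Int) (h : xs ≠ []) : costTop xs (vmax xs) = 0 := by
  unfold costTop
  have : xs.filter (fun x => decide (vmax xs < x)) = [] := by
    rw [List.filter_eq_nil_iff]
    intro x hx
    have := vmax_isMax xs h x hx
    simp; omega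
  simp [this]

theorem costBot_vmin (xs : List Int) (h : xs ≠ []) : costBot xs (vmin xs) = 0 := by
  unfold costBot
  have : xs.filter (fun x => decide (x < vmin xs)) = [] := by
    rw [List.filter_eq_nil_iff]
    intro x hx
    have := vmin_isMin xs h x hx
    simp; omega
  simp [this]

-- removing j units from the top cannot lower the max below vmax - j
theorem costTop_anchor (xs : List Int) (h : xs ≠ []) (j : Nat) :
    (j : Int) ≤ costTop xs (vmax xs - j) := by
  induction j with
  | zero => simpa using costTop_nonneg xs (vmax xs)
  | succ j ih =>
    have hs := costTop_succ xs (vmax xs - (j + 1 : Nat))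
    have he : vmax xs - (j + 1 : Nat) + 1 = vmax xs - j := by push_cast; ring
    rw [he] at hs
    have hc := cntGE_pos xs h (vmax xs - j) (by omega)
    push_cast at hs ih ⊢
    omega

theorem costBot_anchor (xs : List Int) (h : xs ≠ []) (j : Nat) :
    (j : Int) ≤ costBot xs (vmin xs + j) := by
  induction j with
  | zero => simpa using costBot_nonneg xs (vmin xs)
  | succ j ih =>
    have hs := costBot_succ xs (vmin xs + (j + 1 : Nat))
    have he : vmin xs + (j + 1 : Nat) - 1 = vmin xs + j := by push_cast; ring
    rw [he] at hs
    have hc := cntLE_pos xs h (vmin xs + j) (by omega)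
    push_cast at hs ih ⊢
    omega

-- Σ max(x-L,0) - Σ max(L-x,0) = Σ x - n·L
theorem costTop_sub_costBot (xs : List Int) (L : Int) :
    costTop xs L - costBot xs L = xs.sum - (xs.length : Int) * L := by
  rw [costTop_eq_sum, costBot_eq_sum]
  induction xs with
  | nil => simp
  | cons a xs ih =>
    simp only [List.map_cons, List.sum_cons, List.length_cons, List.sum_cons] at *
    push_cast
    have : max (a - L) 0 - max (L - a) 0 = a - L := by omega
    nlinarith [this]

theorem sum_of_all_eq (xs : List Int) (c : Int) (h : ∀ x ∈ xs, x = c) :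
    xs.sum = (xs.length : Int) * c := by
  induction xs with
  | nil => simp
  | cons a xs ih =>
    simp only [List.sum_cons, List.length_cons]
    rw [h a (by simp), ih (fun x hx => h x (by simp [hx]))]
    push_cast; ring

-- the binary search returns the least L in [lo,hi] with costTop ≤ t, given costTop hi ≤ t
theorem bsTopAux_spec (xs : List Int) (t : Int) (fuel : Nat) :
    ∀ lo hi : Int, lo ≤ hi → (hi - lo).toNat ≤ fuel → costTop xs hi ≤ t →
      lo ≤ bsTopAux xs t fuel lo hi ∧ bsTopAux xs t fuel lo hi ≤ hi ∧
      costTop xs (bsTopAux xs t fuel lo hi) ≤ t ∧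
      (lo < bsTopAux xs t fuel lo hi → t < costTop xs (bsTopAux xs t fuel lo hi - 1)) := by
  induction fuel with
  | zero =>
    intro lo hi hle hf hcost
    have : lo = hi := by omega
    subst this
    simp [bsTopAux, hcost]
  | succ fuel ih =>
    intro lo hi hle hf hcost
    by_cases hlt : lo < hi
    · have hmid := PySem.Int.floordiv_two_mid_bounds (lo := lo) (hi := hi) hle
      have hmlt : PySem.Int.floordiv (lo + hi) 2 < hi := by
        rw [PySem.Int.floordiv_lt_iff_lt_mul (by omega)]
        omega
      simp only [bsTopAux, hlt, if_true]
      set mid := PySem.Int.floordiv (lo + hi) 2 with hmiddef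
      by_cases hc : costTop xs mid ≤ t
      · simp only [hc, if_true]
        have := ih lo mid (by omega) (by omega) hc
        exact ⟨this.1, by omega, this.2.2.1, this.2.2.2⟩
      · simp only [hc, if_false]
        have := ih (mid + 1) hi (by omega) (by omega) hcost
        refine ⟨by omega, this.2.1, this.2.2.1, ?_⟩
        intro _
        rcases eq_or_lt_of_le this.1 with heq | hlt2
        · rw [← heq]; simpa using (by omega : t < costTop xs mid)
        · exact this.2.2.2 hlt2
    · have : lo = hi := by omega
      subst this
      simp [bsTopAux, hcost]

theorem bsBotAux_spec (xs : List Int) (t : Int) (fuel : Nat) :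
    ∀ lo hi : Int, lo ≤ hi → (hi - lo).toNat ≤ fuel → costBot xs lo ≤ t →
      lo ≤ bsBotAux xs t fuel lo hi ∧ bsBotAux xs t fuel lo hi ≤ hi ∧
      costBot xs (bsBotAux xs t fuel lo hi) ≤ t ∧
      (bsBotAux xs t fuel lo hi < hi → t < costBot xs (bsBotAux xs t fuel lo hi + 1)) := by
  induction fuel with
  | zero =>
    intro lo hi hle hf hcost
    have : lo = hi := by omega
    subst this
    simp [bsBotAux, hcost]
  | succ fuel ih =>
    intro lo hi hle hf hcost
    by_cases hlt : lo < hi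
    · have hmid := PySem.Int.floordiv_two_mid_bounds (lo := lo) (hi := hi + 1) (by omega)
      rw [show lo + (hi + 1) = lo + hi + 1 by ring] at hmid
      have hmlt : PySem.Int.floordiv (lo + hi + 1) 2 ≤ hi := by
        have : PySem.Int.floordiv (lo + hi + 1) 2 < hi + 1 := by
          rw [PySem.Int.floordiv_lt_iff_lt_mul (by omega)]
          omega
        omega
      have hmgt : lo + 1 ≤ PySem.Int.floordiv (lo + hi + 1) 2 := by
        rw [PySem.Int.le_floordiv_iff_mul_le (by omega)]
        omega
      simp only [bsBotAux, hlt, if_true]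
      set mid := PySem.Int.floordiv (lo + hi + 1) 2 with hmiddef
      by_cases hc : costBot xs mid ≤ t
      · simp only [hc, if_true]
        have := ih mid hi (by omega) (by omega) hc
        refine ⟨by omega, this.2.1, this.2.2.1, this.2.2.2⟩
      · simp only [hc, if_false]
        have := ih lo (mid - 1) (by omega) (by omega) hcost
        refine ⟨this.1, by omega, this.2.2.1, ?_⟩
        intro _
        rcases eq_or_lt_of_le this.2.1 with heq | hlt2
        · rw [heq]; simpa using (by omega : t < costBot xs mid)
        · exact this.2.2.2 hlt2
    · have : lo = hi := by omega
      subst this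
      simp [bsBotAux, hcost]

-- characterisation of Ftop: costTop (Ftop t) ≤ t < costTop (Ftop t - 1), and Ftop t ≤ vmax
theorem Ftop_char (xs : List Int) (h : xs ≠ []) (t : Int) (ht : 0 ≤ t) :
    costTop xs (Ftop xs t) ≤ t ∧ t < costTop xs (Ftop xs t - 1) ∧
    vmax xs - t ≤ Ftop xs t ∧ Ftop xs t ≤ vmax xs := by
  have h0 := costTop_vmax xs h
  have hs := bsTopAux_spec xs t (vmax xs - (vmax xs - t)).toNat (vmax xs - t) (vmax xs)
    (by omega) (by omega) (by omega)
  have hFdef : Ftop xs t = bsTopAux xs t (vmax xs - (vmax xs - t)).toNat (vmax xs - t) (vmax xs) := rfl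
  rw [← hFdef] at hs
  refine ⟨hs.2.2.1, ?_, hs.1, hs.2.1⟩
  rcases eq_or_lt_of_le hs.1 with heq | hlt
  · -- Ftop = lo anchor: costTop (vmax - t - 1) ≥ t + 1 > t
    have hcast : (((t + 1).toNat : Int)) = t + 1 := by omega
    have ha := costTop_anchor xs h (t + 1).toNat
    rw [hcast, show vmax xs - (t + 1) = vmax xs - t - 1 by ring] at ha
    rw [← heq]
    omega
  · exact hs.2.2.2 hlt

theorem Gbot_char (xs : List Int) (h : xs ≠ []) (t : Int) (ht : 0 ≤ t) :
    costBot xs (Gbot xs t) ≤ t ∧ t < costBot xs (Gbot xs t + 1) ∧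
    vmin xs ≤ Gbot xs t ∧ Gbot xs t ≤ vmin xs + t := by
  have h0 := costBot_vmin xs h
  have hs := bsBotAux_spec xs t (vmin xs + t - vmin xs).toNat (vmin xs) (vmin xs + t)
    (by omega) (by omega) (by omega)
  have hGdef : Gbot xs t = bsBotAux xs t (vmin xs + t - vmin xs).toNat (vmin xs) (vmin xs + t) := rfl
  rw [← hGdef] at hs
  refine ⟨hs.2.2.1, ?_, hs.1, hs.2.1⟩
  rcases eq_or_lt_of_le hs.2.1 with heq | hlt
  · have hcast : (((t + 1).toNat : Int)) = t + 1 := by omega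
    have ha := costBot_anchor xs h (t + 1).toNat
    rw [hcast, show vmin xs + (t + 1) = vmin xs + t + 1 by ring] at ha
    rw [heq]
    omega
  · exact hs.2.2.2 hlt

-- uniqueness: anything satisfying the bracket IS Ftop / Gbot
theorem Ftop_uniq (xs : List Int) (h : xs ≠ []) (t : Int) (ht : 0 ≤ t) (c : Int)
    (h1 : costTop xs c ≤ t) (h2 : t < costTop xs (c - 1)) : Ftop xs t = c := by
  have hc := Ftop_char xs h t ht
  by_contra hne
  rcases lt_or_gt_of_ne hne with hlt | hlt
  · have := costTop_antitone xs (Ftop xs t) (c - 1) (by omega)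
    omega
  · have := costTop_antitone xs c (Ftop xs t - 1) (by omega)
    omega

theorem Gbot_uniq (xs : List Int) (h : xs ≠ []) (t : Int) (ht : 0 ≤ t) (c : Int)
    (h1 : costBot xs c ≤ t) (h2 : t < costBot xs (c + 1)) : Gbot xs t = c := by
  have hc := Gbot_char xs h t ht
  by_contra hne
  rcases lt_or_gt_of_ne hne with hlt | hlt
  · have := costBot_monotone xs (Gbot xs t + 1) c (by omega)
    omega
  · have := costBot_monotone xs (c + 1) (Gbot xs t) (by omega)
    omega

theorem Ftop_zero (xs : List Int) (h : xs ≠ []) : Ftop xs 0 = vmax xs := by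
  apply Ftop_uniq xs h 0 le_rfl
  · simp [costTop_vmax xs h]
  · have hcast : ((1 : Nat) : Int) = 1 := by norm_num
    have ha := costTop_anchor xs h 1
    rw [hcast] at ha
    have : vmax xs - 1 = vmax xs - 1 := rfl
    omega

theorem Gbot_zero (xs : List Int) (h : xs ≠ []) : Gbot xs 0 = vmin xs := by
  apply Gbot_uniq xs h 0 le_rfl
  · simp [costBot_vmin xs h]
  · have hcast : ((1 : Nat) : Int) = 1 := by norm_num
    have ha := costBot_anchor xs h 1
    rw [hcast] at ha
    omega

theorem Ftop_anti (xs : List Int) (h : xs ≠ []) (t t' : Int) (ht : 0 ≤ t) (htt : t ≤ t') :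
    Ftop xs t' ≤ Ftop xs t := by
  have h1 := Ftop_char xs h t ht
  have h2 := Ftop_char xs h t' (by omega)
  by_contra hlt
  have := costTop_antitone xs (Ftop xs t) (Ftop xs t' - 1) (by omega)
  omega

theorem Gbot_mono (xs : List Int) (h : xs ≠ []) (t t' : Int) (ht : 0 ≤ t) (htt : t ≤ t') :
    Gbot xs t ≤ Gbot xs t' := by
  have h1 := Gbot_char xs h t ht
  have h2 := Gbot_char xs h t' (by omega)
  by_contra hlt
  have := costBot_monotone xs (Gbot xs t' + 1) (Gbot xs t) (by omega)
  omega

-- the max level drops by at most one per removed unit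
theorem Ftop_drop (xs : List Int) (h : xs ≠ []) (t : Int) (ht : 0 ≤ t) :
    Ftop xs t ≤ Ftop xs (t + 1) + 1 := by
  have h1 := Ftop_char xs h t ht
  have h2 := Ftop_char xs h (t + 1) (by omega)
  by_contra hlt
  -- Ftop (t+1) ≤ Ftop t - 2
  have hstep := costTop_succ xs (Ftop xs t - 2)
  have hrw : Ftop xs t - 2 + 1 = Ftop xs t - 1 := by ring
  rw [hrw] at hstep
  have hcnt := cntGE_pos xs h (Ftop xs t - 1) (by omega)
  have hmono := costTop_antitone xs (Ftop xs (t + 1)) (Ftop xs t - 2) (by omega)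
  omega

theorem Gbot_rise (xs : List Int) (h : xs ≠ []) (t : Int) (ht : 0 ≤ t) :
    Gbot xs (t + 1) ≤ Gbot xs t + 1 := by
  have h1 := Gbot_char xs h t ht
  have h2 := Gbot_char xs h (t + 1) (by omega)
  by_contra hlt
  have hstep := costBot_succ xs (Gbot xs t + 2)
  have hrw : Gbot xs t + 2 - 1 = Gbot xs t + 1 := by ring
  rw [hrw] at hstep
  have hcnt := cntLE_pos xs h (Gbot xs t + 1) (by omega)
  have hmono := costBot_monotone xs (Gbot xs t + 2) (Gbot xs (t + 1)) (by omega)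
  omega

theorem exists_stop (xs : List Int) (h : xs ≠ []) : ∃ t : Nat, dLvl xs (t : Int) ≤ 1 := by
  refine ⟨(max (costTop xs (vmin xs)) (costBot xs (vmax xs))).toNat, ?_⟩
  set t : Int := ((max (costTop xs (vmin xs)) (costBot xs (vmax xs))).toNat : Int) with htdef
  have ht : 0 ≤ t := by positivity
  have ht1 : costTop xs (vmin xs) ≤ t := by
    have := costTop_nonneg xs (vmin xs)
    have := costBot_nonneg xs (vmax xs)
    omega
  have ht2 : costBot xs (vmax xs) ≤ t := by
    have := costTop_nonneg xs (vmin xs)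
    have := costBot_nonneg xs (vmax xs)
    omega
  have h1 := Ftop_char xs h t ht
  have h2 := Gbot_char xs h t ht
  have hF : Ftop xs t ≤ vmin xs := by
    by_contra hgt
    have := costTop_antitone xs (vmin xs) (Ftop xs t - 1) (by omega)
    omega
  have hG : vmax xs ≤ Gbot xs t := by
    by_contra hgt
    have := costBot_monotone xs (Gbot xs t + 1) (vmax xs) (by omega)
    omega
  have := vmin_le_vmax xs h
  unfold dLvl
  omega

-- first number of dumps after which the level gap is ≤ 1
def tstar (xs : List Int) (h : xs ≠ []) : Nat := Nat.find (exists_stop xs h)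

theorem tstar_spec (xs : List Int) (h : xs ≠ []) : dLvl xs ((tstar xs h : Nat) : Int) ≤ 1 :=
  Nat.find_spec (exists_stop xs h)

theorem tstar_min (xs : List Int) (h : xs ≠ []) (u : Nat) (hu : u < tstar xs h) :
    2 ≤ dLvl xs (u : Int) := by
  have := Nat.find_min (exists_stop xs h) hu
  omega

theorem dLvl_anti (xs : List Int) (h : xs ≠ []) (t t' : Int) (ht : 0 ≤ t) (htt : t ≤ t') :
    dLvl xs t' ≤ dLvl xs t := by
  have := Ftop_anti xs h t t' ht htt
  have := Gbot_mono xs h t t' ht htt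
  unfold dLvl
  omega

theorem dLvl_zero_nonneg (xs : List Int) (h : xs ≠ []) : 0 ≤ dLvl xs 0 := by
  unfold dLvl
  rw [Ftop_zero xs h, Gbot_zero xs h]
  exact sub_nonneg.mpr (vmin_le_vmax xs h)

theorem dLvl_tstar_nonneg (xs : List Int) (h : xs ≠ []) : 0 ≤ dLvl xs ((tstar xs h : Nat) : Int) := by
  rcases Nat.eq_zero_or_pos (tstar xs h) with h0 | hpos
  · rw [h0]; exact_mod_cast dLvl_zero_nonneg xs h
  · have hm := tstar_min xs h (tstar xs h - 1) (by omega)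
    have hcast : (((tstar xs h - 1 : Nat)) : Int) + 1 = ((tstar xs h : Nat) : Int) := by omega
    have hd := Ftop_drop xs h ((tstar xs h - 1 : Nat) : Int) (by positivity)
    have hr := Gbot_rise xs h ((tstar xs h - 1 : Nat) : Int) (by positivity)
    rw [hcast] at hd hr
    unfold dLvl at *
    omega

-- if the gap closes to 0 exactly at t* ≥ 1, both searches sit at the same level c with
-- costTop c = costBot c = t*
theorem eq_level (xs : List Int) (h : xs ≠ []) (h1 : 1 ≤ tstar xs h)
    (h0 : dLvl xs ((tstar xs h : Nat) : Int) = 0) :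
    costTop xs (Ftop xs ((tstar xs h : Nat) : Int)) = ((tstar xs h : Nat) : Int) ∧
    costBot xs (Ftop xs ((tstar xs h : Nat) : Int)) = ((tstar xs h : Nat) : Int) := by
  set t : Int := ((tstar xs h : Nat) : Int) with htdef
  have ht1 : 1 ≤ t := by omega
  have hm := tstar_min xs h (tstar xs h - 1) (by omega)
  have hcast : (((tstar xs h - 1 : Nat)) : Int) = t - 1 := by omega
  rw [hcast] at hm
  have hd := Ftop_drop xs h (t - 1) (by omega)
  have hr := Gbot_rise xs h (t - 1) (by omega)
  rw [show t - 1 + 1 = t by ring] at hd hr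
  have hFprev : Ftop xs (t - 1) = Ftop xs t + 1 := by
    have := Ftop_anti xs h (t - 1) t (by omega) (by omega)
    unfold dLvl at hm h0
    omega
  have hGprev : Gbot xs (t - 1) = Ftop xs t - 1 := by
    have := Gbot_mono xs h (t - 1) t (by omega) (by omega)
    unfold dLvl at hm h0
    omega
  have hc1 := Ftop_char xs h (t - 1) (by omega)
  have hc2 := Ftop_char xs h t (by omega)
  have hc3 := Gbot_char xs h (t - 1) (by omega)
  have hc4 := Gbot_char xs h t (by omega)
  rw [hFprev] at hc1
  rw [hGprev] at hc3
  have hGt : Gbot xs t = Ftop xs t := by unfold dLvl at h0; omega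
  rw [hGt] at hc4
  constructor
  · have : Ftop xs t + 1 - 1 = Ftop xs t := by ring
    rw [this] at hc1
    omega
  · have : Ftop xs t - 1 + 1 = Ftop xs t := by ring
    rw [this] at hc3
    omega

-- the frozen final gap: 0 exactly when the total is divisible by n
theorem dLvl_tstar_eq (xs : List Int) (h : xs ≠ []) :
    dLvl xs ((tstar xs h : Nat) : Int) = if ((xs.length : Int)) ∣ xs.sum then 0 else 1 := by
  have hnn := dLvl_tstar_nonneg xs h
  have hsp := tstar_spec xs h
  set t : Int := ((tstar xs h : Nat) : Int) with htdef
  have ht : 0 ≤ t := by positivity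
  rcases (by omega : dLvl xs t = 0 ∨ dLvl xs t = 1) with h0 | h1
  · rw [h0]
    rw [if_pos]
    rcases Nat.eq_zero_or_pos (tstar xs h) with hz | hpos
    · -- t* = 0: vmax = vmin, all elements equal
      have hteq : t = 0 := by omega
      rw [hteq] at h0
      unfold dLvl at h0
      rw [Ftop_zero xs h, Gbot_zero xs h] at h0
      have hall := all_eq_of_vmax_eq_vmin xs h (by omega)
      have := sum_of_all_eq xs (vmax xs) hall
      exact ⟨vmax xs, this⟩
    · have hel := eq_level xs h hpos h0
      rw [← htdef] at hel
      have hid := costTop_sub_costBot xs (Ftop xs t)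
      refine ⟨Ftop xs t, ?_⟩
      omega
  · rw [h1]
    rw [if_neg]
    -- gap 1: n·c + 1 ≤ S ≤ n·(c+1) - 1 with c = Gbot t
    intro hdvd
    obtain ⟨q, hq⟩ := hdvd
    set c : Int := Gbot xs t with hcdef
    have hF : Ftop xs t = c + 1 := by unfold dLvl at h1; omega
    have hcF := Ftop_char xs h t ht
    have hcG := Gbot_char xs h t ht
    rw [← hcdef] at hcG
    rw [hF] at hcF
    rw [show c + 1 - 1 = c by ring] at hcF
    have hid1 := costTop_sub_costBot xs c
    have hid2 := costTop_sub_costBot xs (c + 1)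
    have hn : 1 ≤ (xs.length : Int) := by
      have : xs.length ≠ 0 := fun hh => h (List.eq_nil_of_length_eq_zero hh)
      omega
    -- S ≥ n·c + 1 and S ≤ n·(c+1) - 1
    have hlow : (xs.length : Int) * c + 1 ≤ xs.sum := by omega
    have hhigh : xs.sum ≤ (xs.length : Int) * (c + 1) - 1 := by omega
    -- n·c < n·q < n·(c+1) is impossible
    rw [hq] at hlow hhigh
    have hq1 : c < q := by nlinarith
    have hq2 : q < c + 1 := by nlinarith
    omega

theorem foldl_id_of_mem {α β : Type} (f : β → α → β) (s : β) (l : List α)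
    (h : ∀ a ∈ l, f s a = s) : l.foldl f s = s := by
  induction l with
  | nil => rfl
  | cons a l ih =>
    simp only [List.foldl_cons, h a (by simp)]
    exact ih (fun a ha => h a (by simp [ha]))

-- A's max/min index scan restricted to the first n indices (scanA xs = scanFold xs xs.length)
def scanFold (xs : List Int) (n : Nat) : Int × Int :=
  (PySem.List.pyRange 0 (n : Int) 1).foldl
    (fun (p : Int × Int) idx =>
      if PySem.List.pyGetD xs idx 0 > PySem.List.pyGetD xs p.1 0 then (idx, p.2)
      else if PySem.List.pyGetD xs idx 0 < PySem.List.pyGetD xs p.2 0 then (p.1, idx)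
      else p)
    (0, 0)

-- invariant of A's max/min index scan over the first n indices
theorem scanA_aux (xs : List Int) (h : xs ≠ []) (n : Nat) (hn : n ≤ xs.length) :
    0 ≤ (scanFold xs n).1 ∧ (scanFold xs n).1 < max (n : Int) 1 ∧
    0 ≤ (scanFold xs n).2 ∧ (scanFold xs n).2 < max (n : Int) 1 ∧
    ∀ idx : Int, 0 ≤ idx → idx < max (n : Int) 1 →
      PySem.List.pyGetD xs idx 0 ≤ PySem.List.pyGetD xs (scanFold xs n).1 0 ∧
      PySem.List.pyGetD xs (scanFold xs n).2 0 ≤ PySem.List.pyGetD xs idx 0 := by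
  induction n with
  | zero =>
    have hz : scanFold xs 0 = (0, 0) := by
      unfold scanFold
      rw [show (((0 : Nat)) : Int) = (0 : Int) from rfl, PySem.List.pyRange_one_eq_nil le_rfl]
      rfl
    rw [hz]
    refine ⟨le_rfl, by norm_num, le_rfl, by norm_num, ?_⟩
    intro idx h0 h1
    have : idx = 0 := by omega
    subst this
    exact ⟨le_rfl, le_rfl⟩
  | succ n ih =>
    obtain ⟨hb1, hb2, hb3, hb4, hinv⟩ := ih (by omega)
    set p := scanFold xs n with hp
    have hr : scanFold xs (n + 1) =
        (fun (q : Int × Int) idx =>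
          if PySem.List.pyGetD xs idx 0 > PySem.List.pyGetD xs q.1 0 then (idx, q.2)
          else if PySem.List.pyGetD xs idx 0 < PySem.List.pyGetD xs q.2 0 then (q.1, idx)
          else q) p (n : Int) := by
      unfold scanFold
      rw [show (((n + 1 : Nat)) : Int) = (n : Int) + 1 by push_cast; ring,
        PySem.List.pyRange_one_succ_right (Int.natCast_nonneg n), List.foldl_append]
      rfl
    rw [hr]
    simp only []
    by_cases hgt : PySem.List.pyGetD xs (n : Int) 0 > PySem.List.pyGetD xs p.1 0
    · simp only [hgt, if_true]
      refine ⟨by positivity, by omega, by omega, by omega, ?_⟩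
      intro idx h0 h1
      by_cases hidx : idx < max (n : Int) 1
      · have := hinv idx h0 hidx
        exact ⟨by omega, this.2⟩
      · have : idx = (n : Int) := by omega
        subst this
        have := (hinv p.2 hb3 hb4).1
        exact ⟨le_rfl, by omega⟩
    · simp only [hgt, if_false]
      by_cases hlt : PySem.List.pyGetD xs (n : Int) 0 < PySem.List.pyGetD xs p.2 0
      · simp only [hlt, if_true]
        refine ⟨by omega, by omega, by positivity, by omega, ?_⟩
        intro idx h0 h1
        by_cases hidx : idx < max (n : Int) 1
        · have := hinv idx h0 hidx
          exact ⟨this.1, by omega⟩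
        · have : idx = (n : Int) := by omega
          subst this
          exact ⟨by omega, le_rfl⟩
      · simp only [hlt, if_false]
        refine ⟨hb1, by omega, hb3, by omega, ?_⟩
        intro idx h0 h1
        by_cases hidx : idx < max (n : Int) 1
        · exact hinv idx h0 hidx
        · have : idx = (n : Int) := by omega
          subst this
          exact ⟨by omega, by omega⟩

theorem scanA_spec (xs : List Int) (h : xs ≠ []) :
    0 ≤ (scanA xs).1 ∧ (scanA xs).1 < (xs.length : Int) ∧
    0 ≤ (scanA xs).2 ∧ (scanA xs).2 < (xs.length : Int) ∧
    PySem.List.pyGetD xs (scanA xs).1 0 = vmax xs ∧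
    PySem.List.pyGetD xs (scanA xs).2 0 = vmin xs := by
  have hlen : 1 ≤ (xs.length : Int) := by
    have : xs.length ≠ 0 := fun hh => h (List.eq_nil_of_length_eq_zero hh)
    omega
  have haux := scanA_aux xs h xs.length le_rfl
  have hmax1 : max ((xs.length : Nat) : Int) 1 = (xs.length : Int) := by omega
  rw [hmax1] at haux
  have hscan : scanA xs = scanFold xs xs.length := rfl
  rw [← hscan] at haux
  obtain ⟨hb1, hb2, hb3, hb4, hinv⟩ := haux
  -- pointwise bounds become: the selected entries are the max / min values
  have hmem : ∀ i : Int, 0 ≤ i → i < (xs.length : Int) → PySem.List.pyGetD xs i 0 ∈ xs := by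
    intro i h0 h1
    exact PySem.List.pyGetD_mem xs 0 (by constructor <;> omega)
  have hallle : ∀ x ∈ xs, x ≤ PySem.List.pyGetD xs (scanA xs).1 0 := by
    intro x hx
    obtain ⟨i, hi, hxi⟩ := List.mem_iff_getElem.mp hx
    have := (hinv (i : Int) (by positivity) (by omega)).1
    rw [PySem.List.pyGetD_eq_getElem xs (i := (i : Int)) 0 (by positivity) (by omega)] at this
    simp only [Int.toNat_natCast] at this
    omega
  have hallge : ∀ x ∈ xs, PySem.List.pyGetD xs (scanA xs).2 0 ≤ x := by
    intro x hx
    obtain ⟨i, hi, hxi⟩ := List.mem_iff_getElem.mp hx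
    have := (hinv (i : Int) (by positivity) (by omega)).2
    rw [PySem.List.pyGetD_eq_getElem xs (i := (i : Int)) 0 (by positivity) (by omega)] at this
    simp only [Int.toNat_natCast] at this
    omega
  refine ⟨hb1, hb2, hb3, hb4, ?_, ?_⟩
  · exact eq_vmax xs h _ (hmem _ hb1 hb2) hallle
  · exact eq_vmin xs h _ (hmem _ hb3 hb4) hallge

theorem scanA_allEq (xs : List Int) (c : Int) (hall : ∀ x ∈ xs, x = c) :
    scanA xs = (0, 0) := by
  unfold scanA
  apply foldl_id_of_mem
  intro a ha
  rw [PySem.List.mem_pyRange_one] at ha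
  have hmema : PySem.List.pyGetD xs a 0 ∈ xs :=
    PySem.List.pyGetD_mem xs 0 (by constructor <;> omega)
  have hmem0 : PySem.List.pyGetD xs (0 : Int) 0 ∈ xs :=
    PySem.List.pyGetD_mem xs 0 (by constructor <;> omega)
  rw [hall _ hmema, hall _ hmem0]
  simp

-- one dump of A: decrement the scanned max entry, increment the scanned min entry
def stepB (xs : List Int) : List Int :=
  let p := scanA xs
  let b1 := PySem.List.pySetD xs p.1 (PySem.List.pyGetD xs p.1 0 - 1)
  PySem.List.pySetD b1 p.2 (PySem.List.pyGetD b1 p.2 0 + 1)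

theorem map_sum_set (f : Int → Int) (xs : List Int) :
    ∀ (i : Nat) (hi : i < xs.length) (a : Int),
      ((xs.set i a).map f).sum = (xs.map f).sum - f xs[i] + f a := by
  induction xs with
  | nil => intro i hi; simp at hi
  | cons x xs ih =>
    intro i hi a
    cases i with
    | zero => simp [List.set_cons_zero]; ring
    | succ i =>
      simp only [List.set_cons_succ, List.map_cons, List.sum_cons, List.getElem_cons_succ]
      rw [ih i (by simpa using hi) a]
      ring

theorem stepB_eq_self (xs : List Int) (h : xs ≠ []) (he : vmax xs = vmin xs) :
    stepB xs = xs := by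
  have hall := all_eq_of_vmax_eq_vmin xs h he
  have hs : scanA xs = (0, 0) := scanA_allEq xs (vmax xs) hall
  have hlen : 0 < xs.length := List.length_pos_of_ne_nil h
  unfold stepB
  rw [hs]
  simp only []
  rw [PySem.List.pySetD_of_nonneg xs _ le_rfl]
  rw [PySem.List.pyGetD_eq_getElem xs 0 le_rfl (by exact_mod_cast hlen)]
  rw [PySem.List.pySetD_of_nonneg _ _ le_rfl]
  rw [PySem.List.pyGetD_eq_getElem _ 0 le_rfl (by simpa using (by exact_mod_cast hlen : (0:Int) < (xs.length:Int)))]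
  simp only [Int.toNat_zero]
  rw [List.getElem_set_self (by simpa using hlen)]
  rw [List.set_set]
  simp

theorem stepB_desc (xs : List Int) (h : xs ≠ []) (hne : vmax xs ≠ vmin xs) :
    ∃ (i j : Nat) (hi : i < xs.length) (hj : j < xs.length), i ≠ j ∧
      xs[i] = vmax xs ∧ xs[j] = vmin xs ∧
      stepB xs = (xs.set i (vmax xs - 1)).set j (vmin xs + 1) := by
  obtain ⟨hb1, hb2, hb3, hb4, hvx, hvn⟩ := scanA_spec xs h
  set p := scanA xs with hp
  refine ⟨p.1.toNat, p.2.toNat, by omega, by omega, ?_, ?_, ?_, ?_⟩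
  · intro heq
    apply hne
    rw [← hvx, ← hvn]
    congr 1
    omega
  · rw [PySem.List.pyGetD_eq_getElem xs 0 hb1 hb2] at hvx
    exact hvx
  · rw [PySem.List.pyGetD_eq_getElem xs 0 hb3 hb4] at hvn
    exact hvn
  · unfold stepB
    rw [← hp]
    simp only []
    rw [hvx]
    rw [PySem.List.pySetD_of_nonneg xs _ hb1]
    have hlen1 : (xs.set p.1.toNat (vmax xs - 1)).length = xs.length := by simp
    have hij : p.1.toNat ≠ p.2.toNat := by
      intro heq
      apply hne
      rw [← hvx, ← hvn]
      congr 1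
      omega
    rw [PySem.List.pyGetD_eq_getElem _ 0 hb3 (by rw [hlen1]; exact hb4)]
    rw [List.getElem_set_ne (by omega)]
    rw [PySem.List.pyGetD_eq_getElem xs 0 hb3 hb4] at hvn
    rw [hvn]
    rw [PySem.List.pySetD_of_nonneg _ _ hb3]

theorem costTop_stepB (xs : List Int) (h : xs ≠ []) (hne : vmax xs ≠ vmin xs) (L : Int) :
    costTop (stepB xs) L = costTop xs L
      - max (vmax xs - L) 0 + max (vmax xs - 1 - L) 0
      - max (vmin xs - L) 0 + max (vmin xs + 1 - L) 0 := by
  obtain ⟨i, j, hi, hj, hij, hxi, hxj, heq⟩ := stepB_desc xs h hne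
  rw [heq, costTop_eq_sum, costTop_eq_sum]
  rw [map_sum_set _ _ j (by simpa using hj) _]
  rw [List.getElem_set_ne (by omega)]
  rw [map_sum_set _ _ i hi _]
  rw [hxi, hxj]

theorem costBot_stepB (xs : List Int) (h : xs ≠ []) (hne : vmax xs ≠ vmin xs) (L : Int) :
    costBot (stepB xs) L = costBot xs L
      - max (L - vmax xs) 0 + max (L - (vmax xs - 1)) 0
      - max (L - vmin xs) 0 + max (L - (vmin xs + 1)) 0 := by
  obtain ⟨i, j, hi, hj, hij, hxi, hxj, heq⟩ := stepB_desc xs h hne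
  rw [heq, costBot_eq_sum, costBot_eq_sum]
  rw [map_sum_set _ _ j (by simpa using hj) _]
  rw [List.getElem_set_ne (by omega)]
  rw [map_sum_set _ _ i hi _]
  rw [hxi, hxj]

theorem stepB_ne_nil (xs : List Int) (h : xs ≠ []) : stepB xs ≠ [] := by
  rcases eq_or_ne (vmax xs) (vmin xs) with he | hne
  · rw [stepB_eq_self xs h he]; exact h
  · obtain ⟨i, j, hi, hj, _, _, _, heq⟩ := stepB_desc xs h hne
    intro hnil
    apply h
    have hl := congrArg List.length hnil
    rw [heq] at hl
    simp only [List.length_set, List.length_nil] at hl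
    exact List.eq_nil_of_length_eq_zero hl

theorem dLvl_zero_eq (xs : List Int) (h : xs ≠ []) : dLvl xs 0 = vmax xs - vmin xs := by
  unfold dLvl
  rw [Ftop_zero xs h, Gbot_zero xs h]

theorem dLvl_nonneg_of_le_tstar (xs : List Int) (h : xs ≠ []) (t : Int) (ht : 0 ≤ t)
    (hts : t ≤ ((tstar xs h : Nat) : Int)) : 0 ≤ dLvl xs t := by
  rcases eq_or_lt_of_le hts with heq | hlt
  · rw [heq]
    exact dLvl_tstar_nonneg xs h
  · have := tstar_min xs h t.toNat (by omega)
    rw [show ((t.toNat : Nat) : Int) = t by omega] at this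
    omega

theorem tstar_le_of_dLvl_le (xs : List Int) (h : xs ≠ []) (u : Nat)
    (hu : dLvl xs (u : Int) ≤ 1) : tstar xs h ≤ u :=
  Nat.find_le hu

-- the dump shifts both level searches by exactly one unit, as long as the gap has not closed
theorem shift_lemma (xs : List Int) (h : xs ≠ []) (hd : 2 ≤ dLvl xs 0) (t : Int) (ht : 0 ≤ t)
    (hts : t + 1 ≤ ((tstar xs h : Nat) : Int)) :
    Ftop (stepB xs) t = Ftop xs (t + 1) ∧ Gbot (stepB xs) t = Gbot xs (t + 1) := by
  have h' := stepB_ne_nil xs h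
  rw [dLvl_zero_eq xs h] at hd
  have hne : vmax xs ≠ vmin xs := by omega
  set v := vmax xs with hv
  set m := vmin xs with hm
  set c := Ftop xs (t + 1) with hc
  set c' := Gbot xs (t + 1) with hc'
  have hcF := Ftop_char xs h (t + 1) (by omega)
  have hcG := Gbot_char xs h (t + 1) (by omega)
  rw [← hc, ← hv] at hcF
  rw [← hc', ← hm] at hcG
  have hv0 := costTop_vmax xs h
  have hm0 := costBot_vmin xs h
  rw [← hv] at hv0
  rw [← hm] at hm0
  have hd1 : 0 ≤ dLvl xs (t + 1) := dLvl_nonneg_of_le_tstar xs h (t + 1) (by omega) hts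
  unfold dLvl at hd1
  rw [← hc, ← hc'] at hd1
  -- c ≥ m + 1
  have hcm : m + 1 ≤ c := by
    rcases eq_or_lt_of_le (le_trans hcG.2.2.1 (by omega : c' ≤ c)) with heq | hlt
    · -- c = m forces the gap to have closed exactly at t* = t+1, at level m — impossible
      exfalso
      have hGm : c' = m := by omega
      have hdz : dLvl xs (t + 1) = 0 := by unfold dLvl; omega
      have hT : tstar xs h ≤ (t + 1).toNat := by
        apply tstar_le_of_dLvl_le xs h
        rw [show (((t + 1).toNat : Nat) : Int) = t + 1 by omega]
        omega
      have hTeq : ((tstar xs h : Nat) : Int) = t + 1 := by omega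
      have hT1 : 1 ≤ tstar xs h := by omega
      have hel := eq_level xs h hT1 (by rw [hTeq]; exact hdz)
      rw [hTeq] at hel
      rw [← hc] at hel
      have : c = m := by omega
      rw [this] at hel
      omega
    · omega
  -- c' ≤ v - 1
  have hcv : c' ≤ v - 1 := by
    rcases eq_or_lt_of_le (le_trans (by omega : c' ≤ c) hcF.2.2.2) with heq | hlt
    · exfalso
      have hFv : c = v := by omega
      have hdz : dLvl xs (t + 1) = 0 := by unfold dLvl; omega
      have hT : tstar xs h ≤ (t + 1).toNat := by
        apply tstar_le_of_dLvl_le xs h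
        rw [show (((t + 1).toNat : Nat) : Int) = t + 1 by omega]
        omega
      have hTeq : ((tstar xs h : Nat) : Int) = t + 1 := by omega
      have hT1 : 1 ≤ tstar xs h := by omega
      have hel := eq_level xs h hT1 (by rw [hTeq]; exact hdz)
      rw [hTeq] at hel
      rw [← hc] at hel
      rw [hFv] at hel
      omega
    · omega
  constructor
  · apply Ftop_uniq (stepB xs) h' t ht c
    · have hδ := costTop_stepB xs h hne c
      rw [← hv, ← hm] at hδ
      rcases eq_or_lt_of_le hcF.2.2.2 with heqv | hltv
      · rw [heqv] at hδ ⊢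
        simp only [max_def] at hδ
        split_ifs at hδ <;> omega
      · simp only [max_def] at hδ
        split_ifs at hδ <;> omega
    · have hδ := costTop_stepB xs h hne (c - 1)
      rw [← hv, ← hm] at hδ
      simp only [max_def] at hδ
      split_ifs at hδ <;> omega
  · apply Gbot_uniq (stepB xs) h' t ht c'
    · have hδ := costBot_stepB xs h hne c'
      rw [← hv, ← hm] at hδ
      rcases eq_or_lt_of_le hcG.2.2.1 with heqm | hltm
      · rw [← heqm] at hδ ⊢
        simp only [max_def] at hδ
        split_ifs at hδ <;> omega
      · simp only [max_def] at hδ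
        split_ifs at hδ <;> omega
    · have hδ := costBot_stepB xs h hne (c' + 1)
      rw [← hv, ← hm] at hδ
      simp only [max_def] at hδ
      split_ifs at hδ <;> omega

theorem dLvl_shift (xs : List Int) (h : xs ≠ []) (hd : 2 ≤ dLvl xs 0) (t : Int) (ht : 0 ≤ t)
    (hts : t + 1 ≤ ((tstar xs h : Nat) : Int)) :
    dLvl (stepB xs) t = dLvl xs (t + 1) := by
  obtain ⟨h1, h2⟩ := shift_lemma xs h hd t ht hts
  unfold dLvl
  rw [h1, h2]

theorem tstar_pos (xs : List Int) (h : xs ≠ []) (hd : 2 ≤ dLvl xs 0) : 1 ≤ tstar xs h := by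
  by_contra h0
  have hz : tstar xs h = 0 := by omega
  have hsp := tstar_spec xs h
  rw [hz, show (((0 : Nat)) : Int) = (0 : Int) by norm_num] at hsp
  omega

theorem tstar_shift (xs : List Int) (h : xs ≠ []) (hd : 2 ≤ dLvl xs 0) :
    tstar (stepB xs) (stepB_ne_nil xs h) = tstar xs h - 1 := by
  have hT1 := tstar_pos xs h hd
  apply le_antisymm
  · apply tstar_le_of_dLvl_le
    have := dLvl_shift xs h hd (((tstar xs h - 1 : Nat)) : Int) (by positivity)
      (by omega)
    rw [this]
    rw [show (((tstar xs h - 1 : Nat)) : Int) + 1 = ((tstar xs h : Nat) : Int) by omega]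
    exact tstar_spec xs h
  · by_contra hlt
    set u := tstar (stepB xs) (stepB_ne_nil xs h) with hu
    have hspec := tstar_spec (stepB xs) (stepB_ne_nil xs h)
    rw [← hu] at hspec
    have := dLvl_shift xs h hd ((u : Nat) : Int) (by positivity) (by omega)
    rw [this] at hspec
    have hmin := tstar_min xs h (u + 1) (by omega)
    rw [show (((u + 1 : Nat)) : Int) = ((u : Nat) : Int) + 1 by push_cast; ring] at hmin
    omega

-- the two level-searches are unchanged by a dump when the gap is exactly 1
theorem cost_stepB_gap_one (xs : List Int) (h : xs ≠ []) (h1 : vmax xs = vmin xs + 1) :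
    (∀ L : Int, costTop (stepB xs) L = costTop xs L) ∧
    (∀ L : Int, costBot (stepB xs) L = costBot xs L) := by
  have hne : vmax xs ≠ vmin xs := by omega
  constructor
  · intro L
    have hδ := costTop_stepB xs h hne L
    rw [h1] at hδ
    simp only [max_def] at hδ
    split_ifs at hδ <;> omega
  · intro L
    have hδ := costBot_stepB xs h hne L
    rw [h1] at hδ
    simp only [max_def] at hδ
    split_ifs at hδ <;> omega

theorem dLvl_stepB_gap_one (xs : List Int) (h : xs ≠ []) (h1 : vmax xs = vmin xs + 1) :
    dLvl (stepB xs) 0 = 1 := by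
  have h' := stepB_ne_nil xs h
  obtain ⟨hct, hcb⟩ := cost_stepB_gap_one xs h h1
  have hF : Ftop (stepB xs) 0 = Ftop xs 0 := by
    have hc := Ftop_char xs h 0 le_rfl
    exact Ftop_uniq (stepB xs) h' 0 le_rfl _ (by rw [hct]; exact hc.1) (by rw [hct]; exact hc.2.1)
  have hG : Gbot (stepB xs) 0 = Gbot xs 0 := by
    have hc := Gbot_char xs h 0 le_rfl
    exact Gbot_uniq (stepB xs) h' 0 le_rfl _ (by rw [hcb]; exact hc.1) (by rw [hcb]; exact hc.2.1)
  unfold dLvl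
  rw [hF, hG, Ftop_zero xs h, Gbot_zero xs h]
  omega

theorem loopA_succ_eq (fuel : Nat) (xs : List Int) :
    loopA (fuel + 1) xs =
      (let q := scanA (stepB xs)
       let diff := PySem.List.pyGetD (stepB xs) q.1 0 - PySem.List.pyGetD (stepB xs) q.2 0
       if diff = 0 then 0 else if diff = 1 then 1 else loopA fuel (stepB xs)) := rfl

-- master invariant: A's loop computes the frozen level gap after min(fuel, t*) dumps
theorem loopA_eq (fuel : Nat) : ∀ (xs : List Int) (h : xs ≠ []),
    loopA fuel xs = dLvl xs ((min fuel (tstar xs h) : Nat) : Int) := by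
  induction fuel with
  | zero =>
    intro xs h
    obtain ⟨hb1, hb2, hb3, hb4, hvx, hvn⟩ := scanA_spec xs h
    have : loopA 0 xs = PySem.List.pyGetD xs (scanA xs).1 0 - PySem.List.pyGetD xs (scanA xs).2 0 := rfl
    rw [this, hvx, hvn]
    rw [Nat.zero_min, show (((0 : Nat)) : Int) = (0 : Int) by norm_num, dLvl_zero_eq xs h]
  | succ fuel ih =>
    intro xs h
    have h' := stepB_ne_nil xs h
    obtain ⟨hb1, hb2, hb3, hb4, hvx, hvn⟩ := scanA_spec (stepB xs) h'
    have hdiff : PySem.List.pyGetD (stepB xs) (scanA (stepB xs)).1 0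
        - PySem.List.pyGetD (stepB xs) (scanA (stepB xs)).2 0 = dLvl (stepB xs) 0 := by
      rw [hvx, hvn, dLvl_zero_eq (stepB xs) h']
    rw [loopA_succ_eq]
    simp only [hdiff]
    have hd0 := dLvl_zero_eq xs h
    have hvmn := vmin_le_vmax xs h
    by_cases hcase0 : vmax xs = vmin xs
    · -- all boxes equal: the dump is a no-op, gap 0
      rw [stepB_eq_self xs h hcase0]
      have hz : dLvl xs 0 = 0 := by omega
      have hT : tstar xs h = 0 := by
        have := tstar_le_of_dLvl_le xs h 0 (by rw [show (((0:Nat)):Int) = (0:Int) by norm_num]; omega)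
        omega
      have hmin : ((min (fuel + 1) (tstar xs h) : Nat) : Int) = 0 := by
        rw [hT]; simp
      rw [hz, hmin]
      norm_num
      omega
    · by_cases hcase1 : vmax xs = vmin xs + 1
      · -- gap exactly 1: the dump permutes the boxes, gap stays 1
        have hg := dLvl_stepB_gap_one xs h hcase1
        rw [hg]
        have hz : dLvl xs 0 = 1 := by omega
        have hT : tstar xs h = 0 := by
          have := tstar_le_of_dLvl_le xs h 0 (by rw [show (((0:Nat)):Int) = (0:Int) by norm_num]; omega)
          omega
        have hmin : ((min (fuel + 1) (tstar xs h) : Nat) : Int) = 0 := by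
          rw [hT]; simp
        rw [hmin]
        norm_num
        omega
      · -- gap ≥ 2: a real dump happens
        have hd2 : 2 ≤ dLvl xs 0 := by omega
        have hT1 : 1 ≤ tstar xs h := tstar_pos xs h hd2
        have hsh := dLvl_shift xs h hd2 0 le_rfl (by omega)
        rw [show (0:Int) + 1 = 1 by norm_num] at hsh
        rw [hsh]
        have hnn : 0 ≤ dLvl xs 1 := by
          have := dLvl_nonneg_of_le_tstar xs h 1 (by norm_num) (by omega)
          omega
        by_cases hstop : dLvl xs 1 ≤ 1
        · -- the gap closes after this dump: t* = 1
          have hT : tstar xs h = 1 := by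
            have := tstar_le_of_dLvl_le xs h 1 (by rw [show (((1:Nat)):Int) = (1:Int) by norm_num]; omega)
            omega
          have hmin : min (fuel + 1) (tstar xs h) = 1 := by omega
          rw [hmin, show (((1:Nat)):Int) = (1:Int) by norm_num]
          rcases (by omega : dLvl xs 1 = 0 ∨ dLvl xs 1 = 1) with h0 | h1
          · rw [h0]; simp
          · rw [h1]; norm_num
        · -- still open: recurse
          have hne0 : ¬ (dLvl xs 1 = 0) := by omega
          have hne1 : ¬ (dLvl xs 1 = 1) := by omega
          rw [if_neg hne0, if_neg hne1]
          rw [ih (stepB xs) h']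
          have hTs := tstar_shift xs h hd2
          rw [hTs]
          have hsh2 := dLvl_shift xs h hd2 ((min fuel (tstar xs h - 1) : Nat) : Int)
            (by positivity) (by omega)
          rw [hsh2]
          congr 1
          omega

theorem bridge (xs : List Int) (h : xs ≠ []) (k' : Nat) :
    dLvl xs ((min k' (tstar xs h) : Nat) : Int)
      = max (dLvl xs ((k' : Nat) : Int)) (if ((xs.length : Int)) ∣ xs.sum then 0 else 1) := by
  have hT := dLvl_tstar_eq xs h
  by_cases hle : k' ≤ tstar xs h
  · rw [min_eq_left hle]
    have hanti := dLvl_anti xs h ((k' : Nat) : Int) ((tstar xs h : Nat) : Int) (by positivity) (by omega)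
    rw [← hT]
    exact (max_eq_left hanti).symm
  · rw [min_eq_right (by omega : tstar xs h ≤ k')]
    have hanti := dLvl_anti xs h ((tstar xs h : Nat) : Int) ((k' : Nat) : Int) (by positivity) (by omega)
    rw [← hT]
    exact (max_eq_right hanti).symm

theorem solution_alt_eq (k : Int) (xs : List Int) (h : xs ≠ []) :
    solution_alt k xs
      = max (dLvl xs ((k.toNat : Nat) : Int)) (if ((xs.length : Int)) ∣ xs.sum then 0 else 1) := by
  unfold solution_alt
  have ht : (if k > 0 then k else 0) = ((k.toNat : Nat) : Int) := by
    split_ifs <;> omega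
  simp only [ht]
  rw [show ((PySem.List.max? xs fun y => y).getD 0) = vmax xs from rfl,
    show ((PySem.List.min? xs fun y => y).getD 0) = vmin xs from rfl]
  rw [show bsTop xs ((k.toNat : Nat) : Int) (vmax xs - ((k.toNat : Nat) : Int)) (vmax xs)
      = Ftop xs ((k.toNat : Nat) : Int) from rfl]
  rw [show bsBot xs ((k.toNat : Nat) : Int) (vmin xs) (vmin xs + ((k.toNat : Nat) : Int))
      = Gbot xs ((k.toNat : Nat) : Int) from rfl]
  simp only [PySem.Int.mod_eq_zero_iff_dvd]
  unfold dLvl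
  simp only [max_def]
  split_ifs <;> omega

-- ===== VERDICT (by name: the statement is the Claim_ definition above) =====
theorem solution_spec : Claim_equal_solution := by
  intro dump_limit boxes hdom hpre
  unfold Spec_solution
  have h : boxes ≠ [] := hpre
  rw [show solution dump_limit boxes = loopA dump_limit.toNat boxes from rfl,
    loopA_eq dump_limit.toNat boxes h, bridge boxes h dump_limit.toNat,
    solution_alt_eq dump_limit boxes h]
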